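-- pv_equiv track=rewrite | github.com/SvyatoslavStelmakh/Python-Labs | Laba5/Laba5_2/defending.py | sum_kratniy_3
-- ===== SOURCE A (Python) =====
-- def sum_kratniy_3(number):
--
--     if not isinstance(number, int):
--         raise ValueError("Недопустимое значение для функции")
--
--     total = 0
--     if number >= 0:
--         for i in range(number + 1):
--             if i % 3 == 0:
--                 total += i
--     else:
--         number = abs(number)
--         for i in range(number + 1):
--             if i % 3 == 0:
--                 total -= i
--
--     return total
-- ===== SOURCE B (Python) =====
-- def sum_kratniy_3(number):
--     if not isinstance(number, int):
--         raise ValueError("Недопустимое значение для функции")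
--     k = abs(number) // 3
--     s = 3 * k * (k + 1) // 2
--     return s if number >= 0 else -s
-- ===== Notes on version B (the rewrite author's own statement) =====
-- stated objective: faster
-- what changed: Replaces the O(n) loop over range(|n|+1) by the closed form 3*k*(k+1)//2 with k=|n|//3, negated for negative n.
import Mathlib
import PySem

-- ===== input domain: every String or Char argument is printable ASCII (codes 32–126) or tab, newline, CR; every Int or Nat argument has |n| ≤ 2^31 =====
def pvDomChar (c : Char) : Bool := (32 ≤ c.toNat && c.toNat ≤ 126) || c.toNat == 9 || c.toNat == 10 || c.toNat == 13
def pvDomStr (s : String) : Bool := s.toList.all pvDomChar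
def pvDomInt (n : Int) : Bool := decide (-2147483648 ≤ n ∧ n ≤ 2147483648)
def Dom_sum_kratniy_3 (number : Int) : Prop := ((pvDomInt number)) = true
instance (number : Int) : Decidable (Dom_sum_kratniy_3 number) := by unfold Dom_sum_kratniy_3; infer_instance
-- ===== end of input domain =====

-- B replaces A's O(n) accumulation loop by the closed form 3*k*(k+1)//2, k = |n|//3 (O(1)).

-- ===== PORT A =====
def sum_kratniy_3 (number : Int) : Int :=
  if number ≥ 0 then
    (PySem.List.pyRange 0 (number + 1) 1).foldl
      (fun total i => if PySem.Int.mod i 3 = 0 then total + i else total) 0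
  else
    let number := |number|
    (PySem.List.pyRange 0 (number + 1) 1).foldl
      (fun total i => if PySem.Int.mod i 3 = 0 then total - i else total) 0

-- ===== PORT B =====
def sum_kratniy_3_alt (number : Int) : Int :=
  let k := PySem.Int.floordiv |number| 3
  let s := PySem.Int.floordiv (3 * k * (k + 1)) 2
  if number ≥ 0 then s else -s

-- ===== PRECONDITION & SPEC =====
def Spec_sum_kratniy_3 (number : Int) (out : Int) : Prop := out = sum_kratniy_3_alt number
instance (number : Int) (out : Int) : Decidable (Spec_sum_kratniy_3 number out) := by unfold Spec_sum_kratniy_3; infer_instance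

-- ===== CLAIM (what is proved, stated in full; the proofs are below) =====
def Claim_equal_sum_kratniy_3 : Prop := ∀ (number : Int), Dom_sum_kratniy_3 number → Spec_sum_kratniy_3 number (sum_kratniy_3 number)

-- ===== LEMMAS AND PROOFS =====

-- the positive-branch loop of A, over range(n+1) for n : Nat
def pvLoopAdd (n : Nat) : Int :=
  (PySem.List.pyRange 0 ((n : Int) + 1) 1).foldl
    (fun total i => if PySem.Int.mod i 3 = 0 then total + i else total) 0

def pvLoopSub (n : Nat) : Int :=
  (PySem.List.pyRange 0 ((n : Int) + 1) 1).foldl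
    (fun total i => if PySem.Int.mod i 3 = 0 then total - i else total) 0

lemma pvMod3_eq (i : Int) : PySem.Int.mod i 3 = i % 3 :=
  PySem.Int.mod_eq_emod_of_pos (by norm_num : (0:Int) < 3)

lemma pvLoopAdd_succ (n : Nat) :
    pvLoopAdd (n + 1) =
      if PySem.Int.mod ((n : Int) + 1) 3 = 0 then pvLoopAdd n + ((n : Int) + 1)
      else pvLoopAdd n := by
  unfold pvLoopAdd
  have h : ((n + 1 : Nat) : Int) + 1 = ((n : Int) + 1) + 1 := by push_cast; ring
  rw [h, PySem.List.pyRange_one_succ_right (by positivity : (0:Int) ≤ (n : Int) + 1),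
      List.foldl_append]
  simp

lemma pvLoopSub_succ (n : Nat) :
    pvLoopSub (n + 1) =
      if PySem.Int.mod ((n : Int) + 1) 3 = 0 then pvLoopSub n - ((n : Int) + 1)
      else pvLoopSub n := by
  unfold pvLoopSub
  have h : ((n + 1 : Nat) : Int) + 1 = ((n : Int) + 1) + 1 := by push_cast; ring
  rw [h, PySem.List.pyRange_one_succ_right (by positivity : (0:Int) ≤ (n : Int) + 1),
      List.foldl_append]
  simp

lemma pvLoopAdd_closed : ∀ (n : Nat) (k : Int),
    3 * k ≤ (n : Int) → (n : Int) < 3 * k + 3 → 2 * pvLoopAdd n = 3 * k * (k + 1) := by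
  intro n
  induction n with
  | zero =>
    intro k h1 h2
    have hk : k = 0 := by omega
    subst hk
    have : pvLoopAdd 0 = 0 := by
      unfold pvLoopAdd
      rw [show ((0 : Nat) : Int) + 1 = 0 + 1 by norm_num, PySem.List.pyRange_one_singleton]
      simp
    rw [this]; ring
  | succ n ih =>
    intro k h1 h2
    rw [pvLoopAdd_succ, pvMod3_eq]
    by_cases hd : ((n : Int) + 1) % 3 = 0
    · have hnk : (n : Int) + 1 = 3 * k := by push_cast at h1 h2 ⊢; omega
      have hb1 : 3 * (k - 1) ≤ (n : Int) := by omega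
      have hb2 : (n : Int) < 3 * (k - 1) + 3 := by omega
      have := ih (k - 1) hb1 hb2
      simp only [hd]
      push_cast
      nlinarith [this]
    · have hb1 : 3 * k ≤ (n : Int) := by push_cast at h1 h2 ⊢; omega
      have := ih k hb1 (by push_cast at h2 ⊢; omega)
      simp only [hd]
      push_cast
      linarith [this]

lemma pvLoopSub_eq_neg : ∀ n : Nat, pvLoopSub n = -pvLoopAdd n := by
  intro n
  induction n with
  | zero =>
    unfold pvLoopSub pvLoopAdd
    rw [show ((0 : Nat) : Int) + 1 = 0 + 1 by norm_num, PySem.List.pyRange_one_singleton]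
    simp
  | succ n ih =>
    rw [pvLoopSub_succ, pvLoopAdd_succ, ih]
    split_ifs <;> ring

lemma pvAlt_pos (a : Int) (ha : 0 ≤ a) :
    2 * sum_kratniy_3_alt a = 3 * (a / 3) * (a / 3 + 1) := by
  unfold sum_kratniy_3_alt
  rw [if_pos ha]
  have habs : |a| = a := abs_of_nonneg ha
  rw [habs, PySem.Int.floordiv_eq_ediv_of_pos (by norm_num : (0:Int) < 3),
      PySem.Int.floordiv_eq_ediv_of_pos (by norm_num : (0:Int) < 2)]
  set k := a / 3 with hk
  have heven : (2 : Int) ∣ 3 * k * (k + 1) := by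
    rcases Int.even_or_odd k with ⟨m, hm⟩ | ⟨m, hm⟩
    · exact ⟨3 * m * (k + 1), by rw [hm]; ring⟩
    · exact ⟨3 * k * (m + 1), by rw [hm]; ring⟩
  obtain ⟨c, hc⟩ := heven
  rw [hc]
  rw [Int.mul_ediv_cancel_left c (by norm_num : (2:Int) ≠ 0)]

-- ===== VERDICT (by name: the statement is the Claim_ definition above) =====
theorem sum_kratniy_3_spec : Claim_equal_sum_kratniy_3 := by
  intro number _
  unfold Spec_sum_kratniy_3
  by_cases h : number ≥ 0
  · have hn : sum_kratniy_3 number = pvLoopAdd number.toNat := by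
      unfold sum_kratniy_3 pvLoopAdd
      rw [if_pos h, Int.toNat_of_nonneg h]
    have h2 : 2 * pvLoopAdd number.toNat = 3 * (number / 3) * (number / 3 + 1) := by
      apply pvLoopAdd_closed
      · rw [Int.toNat_of_nonneg h]; omega
      · rw [Int.toNat_of_nonneg h]; omega
    have h3 := pvAlt_pos number h
    rw [hn]; linarith [h2, h3]
  · push Not at h
    have hn : sum_kratniy_3 number = pvLoopSub (-number).toNat := by
      unfold sum_kratniy_3 pvLoopSub
      rw [if_neg (by omega)]
      have : |number| = ((-number).toNat : Int) := by
        rw [Int.toNat_of_nonneg (by omega)]; exact abs_of_neg h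
      simp only [this]
    have ha : sum_kratniy_3_alt number = -sum_kratniy_3_alt (-number) := by
      unfold sum_kratniy_3_alt
      rw [if_neg (by omega), if_pos (by omega : -number ≥ 0), abs_neg]
    rw [hn, pvLoopSub_eq_neg, ha]
    have h2 : 2 * pvLoopAdd (-number).toNat = 3 * (-number / 3) * (-number / 3 + 1) := by
      apply pvLoopAdd_closed
      · rw [Int.toNat_of_nonneg (by omega)]; omega
      · rw [Int.toNat_of_nonneg (by omega)]; omega
    have h3 := pvAlt_pos (-number) (by omega)
    linarith [h2, h3]
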